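-- pv_equiv track=rewrite | github.com/markosolopenko/python | сode_wars/strings/constant_value.py | solve
-- ===== SOURCE A (Python) =====
-- def solve(s: str):
--     vowels = "aeiou"
--     alphabet = 'abcdefghijklmnopqrstuvwxyz'
--     constant_of_value = []
--     count = 0
--     for letter in s:
--         if letter in vowels:
--             s = s.replace(letter,'a')
--     s = s.split('a')
--     for letter in s:
--         for close in letter:
--             count += alphabet.index(close) + 1
--         constant_of_value.append(count)
--         count = 0
--     return max(constant_of_value)
-- ===== SOURCE B (Python) =====
-- def solve(s: str):
--     vowels = "aeiou"
--     alphabet = 'abcdefghijklmnopqrstuvwxyz'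
--     best = 0
--     cur = 0
--     for letter in s:
--         if letter in vowels:
--             best = max(best, cur)
--             cur = 0
--         else:
--             cur += alphabet.index(letter) + 1
--     return max(best, cur)
-- ===== Notes on version B (the rewrite author's own statement) =====
-- stated objective: simpler
-- what changed: Replaced the replace-every-vowel / split / per-segment-sum-list / max pipeline by a single pass over the characters that keeps a running segment sum and a running best, resetting at each vowel.
import Mathlib
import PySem

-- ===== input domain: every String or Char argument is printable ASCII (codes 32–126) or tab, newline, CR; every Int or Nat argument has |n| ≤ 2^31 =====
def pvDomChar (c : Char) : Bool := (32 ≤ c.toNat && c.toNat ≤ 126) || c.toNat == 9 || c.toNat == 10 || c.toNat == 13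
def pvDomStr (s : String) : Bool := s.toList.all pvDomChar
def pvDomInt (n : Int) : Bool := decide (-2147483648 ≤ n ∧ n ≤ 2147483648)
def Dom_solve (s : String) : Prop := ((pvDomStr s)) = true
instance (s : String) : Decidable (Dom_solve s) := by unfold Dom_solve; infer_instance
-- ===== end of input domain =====

-- B replaces A's repeated replace + vowel-split + segment-sum-list + max pipeline by a single
-- running-max pass over the characters (objective: simpler; equivalence proved on lowercase-letter inputs).


-- ===== PORT A =====
-- 'for letter in s: s = s.replace(letter, "a")' iterates over the ORIGINAL string object, so the
-- fold runs over s.toList while the accumulator carries the evolving string.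
-- alphabet.index(close) is ported as PySem.Chars.find (exact where the char occurs in the
-- alphabet; where it does not, Python raises ValueError — those inputs are excluded by Pre_solve).
def solve (s : String) : Int :=
  let vowels := "aeiou".toList
  let alphabet := "abcdefghijklmnopqrstuvwxyz".toList
  let s1 := s.toList.foldl
    (fun cur letter =>
      if PySem.Chars.isIn [letter] vowels then PySem.Chars.replace cur [letter] ['a'] else cur)
    s.toList
  let parts := PySem.Chars.splitOn s1 ['a']
  let res := parts.foldl
    (fun (st : List Int × Int) letter =>
      (st.1 ++ [letter.foldl (fun count close => count + (PySem.Chars.find alphabet [close] + 1)) st.2], 0))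
    ([], 0)
  (PySem.List.max? res.1 (fun x => x)).getD 0

-- ===== PORT B =====
def solve_alt (s : String) : Int :=
  let vowels := "aeiou".toList
  let alphabet := "abcdefghijklmnopqrstuvwxyz".toList
  let r := s.toList.foldl
    (fun (st : Int × Int) letter =>
      if PySem.Chars.isIn [letter] vowels then (max st.1 st.2, 0)
      else (st.1, st.2 + (PySem.Chars.find alphabet [letter] + 1)))
    (0, 0)
  max r.1 r.2

-- ===== PRECONDITION & SPEC =====
-- Pre_solve: every character is a lowercase ASCII letter. On any other character both Pythons
-- raise ValueError (alphabet.index on a char outside the lowercase alphabet), so A returns exactly on Pre_solve.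
def Pre_solve (s : String) : Prop := (s.toList.all (fun c => 'a' ≤ c && c ≤ 'z')) = true
instance (s : String) : Decidable (Pre_solve s) := by unfold Pre_solve; infer_instance
def pvWitness_solve : String := "zodiac"
def Spec_solve (s : String) (out : Int) : Prop := out = solve_alt s
instance (s : String) (out : Int) : Decidable (Spec_solve s out) := by unfold Spec_solve; infer_instance

-- ===== CLAIM (what is proved, stated in full; the proofs are below) =====
def Claim_equal_solve : Prop := ∀ (s : String), Dom_solve s → Pre_solve s → Spec_solve s (solve s)

-- ===== LEMMAS AND PROOFS =====

def pvVowels : List Char := ['a', 'e', 'i', 'o', 'u']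

def pvF (c : Char) : Char := if c ∈ pvVowels then 'a' else c

def pvVal (c : Char) : Int := PySem.Chars.find "abcdefghijklmnopqrstuvwxyz".toList [c] + 1

-- split on the single character 'a', the first segment extended to the left by `pre`
def pvSplit : List Char → List Char → List (List Char)
  | pre, [] => [pre]
  | pre, c :: t => if c = 'a' then pre :: pvSplit [] t else pvSplit (pre ++ [c]) t

def pvSegSum (seg : List Char) : Int := (seg.map pvVal).sum

def pvListMax (b cur : Int) : List Int → Int
  | [] => max b cur
  | s0 :: rest => rest.foldl max (max b (cur + s0))

-- membership test through find.go on a one-character needle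
theorem pv_findgo_singleton (c : Char) : ∀ (l : List Char) (k : Nat),
    (PySem.Chars.find.go [c] l k != -1) = decide (c ∈ l) := by
  intro l
  induction l with
  | nil => intro k; simp [PySem.Chars.find.go]
  | cons h t ih =>
      intro k
      by_cases hc : c = h
      · subst hc
        simp [PySem.Chars.find.go, List.isPrefixOf]
      · simp [PySem.Chars.find.go, List.isPrefixOf, hc, ih (k + 1)]

theorem pv_isIn_singleton (c : Char) (l : List Char) :
    PySem.Chars.isIn [c] l = decide (c ∈ l) :=
  pv_findgo_singleton c l 0

theorem pv_findgo_ge (sub : List Char) : ∀ (l : List Char) (k : Nat),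
    -1 ≤ PySem.Chars.find.go sub l k := by
  intro l
  induction l with
  | nil => intro k; simp [PySem.Chars.find.go]; split <;> omega
  | cons h t ih =>
      intro k
      simp [PySem.Chars.find.go]
      split
      · omega
      · exact ih (k + 1)

theorem pv_val_nonneg (c : Char) : 0 ≤ pvVal c := by
  have := pv_findgo_ge [c] ("abcdefghijklmnopqrstuvwxyz".toList) 0
  simp only [pvVal, PySem.Chars.find]
  omega

theorem pv_segSum_nonneg (seg : List Char) : 0 ≤ pvSegSum seg := by
  apply List.sum_nonneg
  intro x hx
  obtain ⟨c, _, rfl⟩ := List.mem_map.1 hx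
  exact pv_val_nonneg c

-- replace with a one-character pattern is map
theorem pv_replacego (v : Char) : ∀ (l acc : List Char) (fuel : Nat), l.length ≤ fuel →
    PySem.Chars.replace.go [v] ['a'] fuel l acc
      = acc.reverse ++ l.map (fun c => if c = v then 'a' else c) := by
  intro l
  induction l with
  | nil =>
      intro acc fuel _
      cases fuel <;> simp [PySem.Chars.replace.go]
  | cons h t ih =>
      intro acc fuel hf
      cases fuel with
      | zero => simp at hf
      | succ fuel =>
          by_cases hv : v = h
          · subst hv
            simp [PySem.Chars.replace.go, List.isPrefixOf,
              ih ('a' :: acc) fuel (by simpa using hf)]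
          · simp [PySem.Chars.replace.go, List.isPrefixOf, hv, Ne.symm hv,
              ih (h :: acc) fuel (by simpa using hf)]

theorem pv_replace_single (v : Char) (l : List Char) :
    PySem.Chars.replace l [v] ['a'] = l.map (fun c => if c = v then 'a' else c) := by
  simp [PySem.Chars.replace]
  exact pv_replacego v l [] l.length le_rfl

-- the replace loop maps every vowel occurring in the iterated list to 'a'
theorem pv_fold_replace : ∀ (todo cur : List Char),
    todo.foldl
      (fun cur letter =>
        if letter ∈ pvVowels then cur.map (fun c => if c = letter then 'a' else c) else cur)
      cur
    = cur.map (fun c => if c ∈ pvVowels ∧ c ∈ todo then 'a' else c) := by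
  intro todo
  induction todo with
  | nil => intro cur; simp
  | cons v rest ih =>
      intro cur
      by_cases hv : v ∈ pvVowels
      · simp only [List.foldl_cons, hv, if_pos]
        rw [ih, List.map_map]
        apply List.map_congr_left
        intro c _
        by_cases hc : c = v
        · subst hc
          have ha : 'a' ∈ pvVowels := by decide
          simp [Function.comp, ha, hv]
        · simp only [Function.comp, if_neg hc]
          by_cases hcv : c ∈ pvVowels <;> simp [hcv, hc, List.mem_cons]
      · simp only [List.foldl_cons, if_neg hv]
        rw [ih]
        apply List.map_congr_left
        intro c _
        by_cases hc : c = v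
        · subst hc; simp [hv]
        · by_cases hcv : c ∈ pvVowels <;> simp [hcv, hc, List.mem_cons]

-- splitOn with the one-character separator 'a' is pvSplit
theorem pv_splitgo : ∀ (l : List Char) (fuel : Nat) (cur : List Char) (acc : List (List Char)),
    l.length < fuel →
    PySem.Chars.splitOn.go ['a'] fuel l cur acc = acc.reverse ++ pvSplit cur.reverse l := by
  intro l
  induction l with
  | nil =>
      intro fuel cur acc hf
      cases fuel with
      | zero => omega
      | succ fuel => simp [PySem.Chars.splitOn.go, pvSplit]
  | cons c t ih =>
      intro fuel cur acc hf
      cases fuel with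
      | zero => omega
      | succ fuel =>
          by_cases hc : c = 'a'
          · subst hc
            simp [PySem.Chars.splitOn.go, List.isPrefixOf,
              ih fuel [] (cur.reverse :: acc) (by simp at hf; omega), pvSplit]
          · simp [PySem.Chars.splitOn.go, List.isPrefixOf, hc, Ne.symm hc,
              ih fuel (c :: cur) acc (by simp at hf; omega), pvSplit]

theorem pv_splitOn_single (l : List Char) :
    PySem.Chars.splitOn l ['a'] = pvSplit [] l := by
  have := pv_splitgo l (l.length + 1) [] [] (by omega)
  simpa [PySem.Chars.splitOn] using this

-- pvSplit with a nonempty prefix only extends the first segment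
theorem pv_split_pre : ∀ (t : List Char), ∃ h tt, pvSplit [] t = h :: tt ∧
    ∀ pre, pvSplit pre t = (pre ++ h) :: tt := by
  intro t
  induction t with
  | nil => exact ⟨[], [], by simp [pvSplit], fun pre => by simp [pvSplit]⟩
  | cons c t ih =>
      obtain ⟨h, tt, h1, h2⟩ := ih
      by_cases hc : c = 'a'
      · subst hc
        exact ⟨[], pvSplit [] t, by simp [pvSplit], fun pre => by simp [pvSplit]⟩
      · refine ⟨c :: h, tt, ?_, ?_⟩
        · simpa [pvSplit, hc] using h2 [c]
        · intro pre
          simpa [pvSplit, hc] using h2 (pre ++ [c])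

-- A's outer loop builds the list of segment sums
theorem pv_afold : ∀ (parts : List (List Char)) (acc : List Int),
    parts.foldl
      (fun (st : List Int × Int) letter =>
        (st.1 ++ [letter.foldl (fun count close => count + pvVal close) st.2], 0))
      (acc, 0)
    = (acc ++ parts.map pvSegSum, 0) := by
  intro parts
  induction parts with
  | nil => intro acc; simp
  | cons seg rest ih =>
      intro acc
      simp only [List.foldl_cons]
      rw [PySem.List.foldl_add (g := pvVal)]
      rw [ih]
      simp [pvSegSum]

-- B's single pass computes the running maximum of the segment sums of the vowel-mapped list
theorem pv_main : ∀ (t : List Char) (b cur : Int),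
    (let r := t.foldl
        (fun (st : Int × Int) letter =>
          if letter ∈ pvVowels then (max st.1 st.2, 0)
          else (st.1, st.2 + pvVal letter))
        (b, cur);
      max r.1 r.2)
    = pvListMax b cur ((pvSplit [] (t.map pvF)).map pvSegSum) := by
  intro t
  induction t with
  | nil =>
      intro b cur
      simp [pvSplit, pvListMax, pvSegSum]
  | cons c t ih =>
      intro b cur
      by_cases hc : c ∈ pvVowels
      · have hF : pvF c = 'a' := by simp [pvF, hc]
        simp only [List.map_cons, hF, List.foldl_cons, if_pos hc]
        rw [ih (max b cur) 0]
        obtain ⟨h, tt, h1, -⟩ := pv_split_pre (t.map pvF)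
        simp [pvSplit, h1, pvListMax, pvSegSum, max_assoc]
      · have hF : pvF c = c := by simp [pvF, hc]
        have hca : ¬ c = 'a' := by
          intro hca; subst hca; simp [pvVowels] at hc
        simp only [List.map_cons, hF, List.foldl_cons, if_neg hc]
        rw [ih b (cur + pvVal c)]
        obtain ⟨h, tt, h1, h2⟩ := pv_split_pre (t.map pvF)
        simp [pvSplit, hca, h1, h2 [c], pvListMax, pvSegSum, add_assoc]

-- ===== VERDICT (by name: the statement is the Claim_ definition above) =====
theorem solve_spec : Claim_equal_solve := by
  intro s _ _
  unfold Spec_solve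
  simp only [solve, solve_alt]
  -- A's replace loop computes the vowel→'a' map
  have h1 : s.toList.foldl
      (fun cur letter =>
        if PySem.Chars.isIn [letter] "aeiou".toList then PySem.Chars.replace cur [letter] ['a'] else cur)
      s.toList = s.toList.map pvF := by
    have e1 := PySem.List.foldl_congr_mem s.toList
      (fun cur letter =>
        if PySem.Chars.isIn [letter] "aeiou".toList then PySem.Chars.replace cur [letter] ['a'] else cur)
      (fun (cur : List Char) (letter : Char) =>
        if letter ∈ pvVowels then cur.map (fun c => if c = letter then 'a' else c) else cur)
      s.toList
      (by intro acc x hx; simp [pv_isIn_singleton, pv_replace_single, pvVowels])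
    rw [e1, pv_fold_replace]
    apply List.map_congr_left
    intro c hc
    simp [pvF, hc]
  rw [h1, pv_splitOn_single]
  have h2 := pv_afold (pvSplit [] (s.toList.map pvF)) []
  simp only [pvVal] at h2
  rw [h2]
  -- B's loop
  have e2 := PySem.List.foldl_congr_mem s.toList
    (fun (st : Int × Int) letter =>
      if PySem.Chars.isIn [letter] "aeiou".toList then (max st.1 st.2, 0)
      else (st.1, st.2 + (PySem.Chars.find "abcdefghijklmnopqrstuvwxyz".toList [letter] + 1)))
    (fun (st : Int × Int) (letter : Char) =>
      if letter ∈ pvVowels then (max st.1 st.2, 0)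
      else (st.1, st.2 + pvVal letter))
    (0, 0)
    (by intro acc x hx; simp [pv_isIn_singleton, pvVal, pvVowels])
  rw [e2]
  have h3 := pv_main s.toList 0 0
  simp only at h3
  rw [h3]
  -- both sides are the running max of the segment sums
  obtain ⟨h, tt, hsplit, -⟩ := pv_split_pre (s.toList.map pvF)
  rw [hsplit]
  simp only [List.nil_append, List.map_cons, pvListMax]
  rw [PySem.List.max?_id_cons]
  simp only [Option.getD_some, zero_add]
  rw [max_eq_right (pv_segSum_nonneg h)]
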